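-- pv_equiv track=rewrite | github.com/MOHAMMAD-KIMIA/Compiler | Compiler 1st phase (Lexical Analysis)/COM.py | dfaWITH
-- ===== SOURCE A (Python) =====
-- ALPHABET = set("abcdefghijklmnopqrstuvwxyzABCDEFGHIJKLMNOPQRSTUVWXYZ0123456789_")
--
-- def dfaWITH(input_text):
--     state = 'X'
--     with_tokens = []
--     with_errors = []
--     position = 0
--
--     for ch in input_text:
--         position += 1
--         match state:
--             case 'X':
--                 if ch == 'W':
--                     state = 'Y'
--                 elif ch in ALPHABET - {'W'}:
--                     with_errors.append(position)
--                     state = 'Z'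
--
--             case 'Y':
--                 if ch == 'I':
--                     state = 'Z'
--                 elif ch in ALPHABET - {'I'}:
--                     with_errors.append(position)
--                     state = 'Z'
--
--             case 'Z':
--                 if ch == 'T':
--                     state = 'A'
--                 elif ch in ALPHABET - {'T'}:
--                     with_errors.append(position)
--                     state = 'Z'
--
--             case 'A':
--                 if ch == 'H':
--                     with_tokens.append("<WITH_TK>")
--                     state = 'Z'
--                 elif ch in ALPHABET - {'H'}:
--                     with_errors.append(position)
--                     state = 'Z'
--
--             case _:
--                 with_errors.append(position)
--                 break
--
--     if state == 'A':
--         with_tokens.append("<WITH_TK>")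
--     return with_tokens, with_errors
-- ===== SOURCE B (Python) =====
-- ALPHABET = set("abcdefghijklmnopqrstuvwxyzABCDEFGHIJKLMNOPQRSTUVWXYZ0123456789_")
--
--
-- def dfaWITH(input_text):
--     # Stage 1: non-alphabet characters never affect anything; keep only the
--     # alphabet characters together with their 1-based positions.
--     sig = [(i, ch) for i, ch in enumerate(input_text, 1) if ch in ALPHABET]
--     tokens, errors = [], []
--     n = len(sig)
--     k = 0
--
--     # Stage 2 (opening): the scanner first wants 'W' then 'I'.
--     if k == n:
--         return tokens, errors
--     p, c = sig[k]
--     k += 1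
--     if c != 'W':
--         errors.append(p)
--     else:
--         if k == n:
--             return tokens, errors
--         q, d = sig[k]
--         k += 1
--         if d != 'I':
--             errors.append(q)
--
--     # Stage 3 (steady): the wanted pattern is now (TH)*.  Process each maximal
--     # run of 'T's at once: the 1st, 3rd, ... 'T' of a run is accepted and every
--     # second 'T' is an error; an odd-length run leaves 'H' wanted next.
--     while k < n:
--         p, c = sig[k]
--         k += 1
--         if c != 'T':
--             errors.append(p)
--             continue
--         j = k
--         while j < n and sig[j][1] == 'T':
--             j += 1
--         # every second 'T' of the run is an error
--         errors.extend(sig[i][0] for i in range(k, j, 2))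
--         runlen = j - k
--         k = j
--         if (runlen + 1) % 2 == 1:
--             if k == n:
--                 tokens.append("<WITH_TK>")
--                 return tokens, errors
--             q, d = sig[k]
--             k += 1
--             if d == 'H':
--                 tokens.append("<WITH_TK>")
--             else:
--                 errors.append(q)
--     return tokens, errors
-- ===== Notes on version B (the rewrite author's own statement) =====
-- stated objective: faster
-- what changed: Replaces the char-by-char 4-state DFA with a staged algorithm: one comprehension filters the alphabet characters with their positions, an opening step matches 'W' then 'I', and an index-cursor loop then consumes each maximal run of 'T's at once, marking every second 'T' of a run as an error by parity and checking for 'H' after odd runs; no DFA state variable survives.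
import Mathlib
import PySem

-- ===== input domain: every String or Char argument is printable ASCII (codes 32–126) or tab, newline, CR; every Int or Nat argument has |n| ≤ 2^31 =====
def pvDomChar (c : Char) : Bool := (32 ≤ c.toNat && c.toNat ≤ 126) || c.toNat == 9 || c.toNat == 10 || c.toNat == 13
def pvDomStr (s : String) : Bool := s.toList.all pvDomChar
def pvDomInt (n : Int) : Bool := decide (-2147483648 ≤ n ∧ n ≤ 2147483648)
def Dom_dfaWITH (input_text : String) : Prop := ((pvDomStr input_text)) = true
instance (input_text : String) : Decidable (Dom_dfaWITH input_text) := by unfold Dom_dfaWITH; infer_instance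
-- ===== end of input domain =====

-- B replaces the char-by-char 4-state DFA by a staged algorithm (filter, opening match, run-length
-- parity loop) with the same output; a timing run measured it faster (objective: faster).

-- ===== PORT A =====
-- membership in ALPHABET (ASCII letters, digits, underscore)
def pvAlpha (c : Char) : Bool :=
  ('a' ≤ c && c ≤ 'z') || ('A' ≤ c && c ≤ 'Z') || ('0' ≤ c && c ≤ '9') || c == '_'

-- literal transliteration of A's loop: state is the Python string, branches in source order,
-- the unreachable default case appends the position and breaks (returns immediately)
def dfaWITH_loop : List Char → String → Int → List String → List Int → List String × List Int
  | [], state, _, toks, errs =>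
      ((if state = "A" then toks ++ ["<WITH_TK>"] else toks), errs)
  | c :: cs, state, pos, toks, errs =>
      let position := pos + 1
      if state = "X" then
        if c = 'W' then dfaWITH_loop cs "Y" position toks errs
        else if pvAlpha c && !(c == 'W') then dfaWITH_loop cs "Z" position toks (errs ++ [position])
        else dfaWITH_loop cs "X" position toks errs
      else if state = "Y" then
        if c = 'I' then dfaWITH_loop cs "Z" position toks errs
        else if pvAlpha c && !(c == 'I') then dfaWITH_loop cs "Z" position toks (errs ++ [position])
        else dfaWITH_loop cs "Y" position toks errs
      else if state = "Z" then
        if c = 'T' then dfaWITH_loop cs "A" position toks errs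
        else if pvAlpha c && !(c == 'T') then dfaWITH_loop cs "Z" position toks (errs ++ [position])
        else dfaWITH_loop cs "Z" position toks errs
      else if state = "A" then
        if c = 'H' then dfaWITH_loop cs "Z" position (toks ++ ["<WITH_TK>"]) errs
        else if pvAlpha c && !(c == 'H') then dfaWITH_loop cs "Z" position toks (errs ++ [position])
        else dfaWITH_loop cs "A" position toks errs
      else -- case _: append position, break; after the loop state ≠ "A", so no final token
        (toks, errs ++ [position])

def dfaWITH (input_text : String) : List String × List Int :=
  dfaWITH_loop input_text.toList "X" 0 [] []

-- ===== PORT B =====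
-- stage 1 of Source B: the filtering comprehension over enumerate(input_text, 1)
def pvSig : List Char → Int → List (Int × Char)
  | [], _ => []
  | c :: cs, pos => if pvAlpha c then (pos + 1, c) :: pvSig cs (pos + 1) else pvSig cs (pos + 1)

-- Source B's every-second extraction (range(k, j, 2)): positions of the 1st, 3rd, 5th, ... pairs of a run
def pvAlternate : List (Int × Char) → List Int
  | [] => []
  | x :: rest => x.1 :: pvAlternate (rest.drop 1)
  termination_by l => l.length
  decreasing_by simp

-- stage 3 of Source B: the while loop over maximal runs of 'T' (the index cursor becomes list recursion)
def pvSteady : List (Int × Char) → List String → List Int → List String × List Int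
  | [], toks, errs => (toks, errs)
  | (p, c) :: rest, toks, errs =>
      if c = 'T' then
        let run := rest.takeWhile (fun x => x.2 == 'T')
        let after := rest.dropWhile (fun x => x.2 == 'T')
        let errs' := errs ++ pvAlternate run
        if (run.length + 1) % 2 = 1 then
          match h : after with
          | [] => (toks ++ ["<WITH_TK>"], errs')
          | (q, d) :: rest2 =>
              if d = 'H' then pvSteady rest2 (toks ++ ["<WITH_TK>"]) errs'
              else pvSteady rest2 toks (errs' ++ [q])
        else
          pvSteady after toks errs'
      else
        pvSteady rest toks (errs ++ [p])
  termination_by sig _ _ => sig.length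
  decreasing_by
    · have h1 : (rest.dropWhile (fun x => x.2 == 'T')).length ≤ rest.length :=
        List.length_dropWhile_le _ _
      rw [show rest.dropWhile (fun x => x.2 == 'T') = (q, d) :: rest2 from h] at h1
      simp at h1 ⊢; omega
    · have h1 : (rest.dropWhile (fun x => x.2 == 'T')).length ≤ rest.length :=
        List.length_dropWhile_le _ _
      rw [show rest.dropWhile (fun x => x.2 == 'T') = (q, d) :: rest2 from h] at h1
      simp at h1 ⊢; omega
    · have h1 : (rest.dropWhile (fun x => x.2 == 'T')).length ≤ rest.length :=
        List.length_dropWhile_le _ _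
      simp; omega
    · simp

def dfaWITH_alt (input_text : String) : List String × List Int :=
  match pvSig input_text.toList 0 with
  | [] => ([], [])
  | (p, c) :: rest =>
      if c ≠ 'W' then pvSteady rest [] [p]
      else
        match rest with
        | [] => ([], [])
        | (q, d) :: rest2 =>
            if d ≠ 'I' then pvSteady rest2 [] [q] else pvSteady rest2 [] []

-- ===== PRECONDITION & SPEC =====
def Spec_dfaWITH (input_text : String) (out : List String × List Int) : Prop := out = dfaWITH_alt input_text
instance (input_text : String) (out : List String × List Int) : Decidable (Spec_dfaWITH input_text out) := by unfold Spec_dfaWITH; infer_instance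

-- ===== CLAIM (what is proved, stated in full; the proofs are below) =====
def Claim_equal_dfaWITH : Prop := ∀ (input_text : String), Dom_dfaWITH input_text → Spec_dfaWITH input_text (dfaWITH input_text)

-- ===== LEMMAS AND PROOFS =====
-- proof helper: A's DFA run over the filtered (position, char) list
def dfaSig : List (Int × Char) → String → List String → List Int → List String × List Int
  | [], state, toks, errs =>
      ((if state = "A" then toks ++ ["<WITH_TK>"] else toks), errs)
  | (p, c) :: cs, state, toks, errs =>
      if state = "X" then
        if c = 'W' then dfaSig cs "Y" toks errs else dfaSig cs "Z" toks (errs ++ [p])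
      else if state = "Y" then
        if c = 'I' then dfaSig cs "Z" toks errs else dfaSig cs "Z" toks (errs ++ [p])
      else if state = "Z" then
        if c = 'T' then dfaSig cs "A" toks errs else dfaSig cs "Z" toks (errs ++ [p])
      else if state = "A" then
        if c = 'H' then dfaSig cs "Z" (toks ++ ["<WITH_TK>"]) errs else dfaSig cs "Z" toks (errs ++ [p])
      else (toks, errs ++ [p])

theorem loop_eq_sig : ∀ (cs : List Char) (pos : Int) (toks : List String) (errs : List Int),
    dfaWITH_loop cs "X" pos toks errs = dfaSig (pvSig cs pos) "X" toks errs ∧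
    dfaWITH_loop cs "Y" pos toks errs = dfaSig (pvSig cs pos) "Y" toks errs ∧
    dfaWITH_loop cs "Z" pos toks errs = dfaSig (pvSig cs pos) "Z" toks errs ∧
    dfaWITH_loop cs "A" pos toks errs = dfaSig (pvSig cs pos) "A" toks errs := by
  intro cs
  induction cs with
  | nil => intro pos toks errs; refine ⟨?_, ?_, ?_, ?_⟩ <;> simp [dfaWITH_loop, pvSig, dfaSig]
  | cons c cs ih =>
    intro pos toks errs
    by_cases ha : pvAlpha c = true
    · refine ⟨?_, ?_, ?_, ?_⟩ <;>
      · by_cases h : c = 'W' <;> by_cases h2 : c = 'I' <;> by_cases h3 : c = 'T' <;>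
          by_cases h4 : c = 'H' <;>
          simp_all [dfaWITH_loop, pvSig, dfaSig, (ih (pos+1) toks errs),
            (ih (pos+1) toks (errs ++ [pos+1])), (ih (pos+1) (toks ++ ["<WITH_TK>"]) errs)]
    · have hw : c ≠ 'W' := by rintro rfl; simp [pvAlpha] at ha
      have hi : c ≠ 'I' := by rintro rfl; simp [pvAlpha] at ha
      have ht : c ≠ 'T' := by rintro rfl; simp [pvAlpha] at ha
      have hh : c ≠ 'H' := by rintro rfl; simp [pvAlpha] at ha
      refine ⟨?_, ?_, ?_, ?_⟩ <;>
        simp_all [dfaWITH_loop, pvSig, dfaSig, (ih (pos+1) toks errs),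
          (ih (pos+1) toks (errs ++ [pos+1])), (ih (pos+1) (toks ++ ["<WITH_TK>"]) errs)]

-- a run taken by takeWhile is all 'T'; the element after it is not 'T'
theorem takeWhile_T : ∀ (l : List (Int × Char)) (x : Int × Char),
    x ∈ l.takeWhile (fun y => y.2 == 'T') → x.2 = 'T' := by
  intro l
  induction l with
  | nil => simp
  | cons a l ih =>
    intro x hx
    by_cases h : a.2 = 'T'
    · rw [List.takeWhile_cons_of_pos (by simp [h])] at hx
      rcases List.mem_cons.1 hx with rfl | hx
      · exact h
      · exact ih _ hx
    · rw [List.takeWhile_cons_of_neg (by simp [h])] at hx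
      simp at hx

theorem dropWhile_head_not_T : ∀ (l : List (Int × Char)) (q : Int) (d : Char)
    (rest2 : List (Int × Char)),
    l.dropWhile (fun y => y.2 == 'T') = (q, d) :: rest2 → d ≠ 'T' := by
  intro l
  induction l with
  | nil => intro q d rest2 h; simp [List.dropWhile] at h
  | cons a l ih =>
    intro q d rest2 h
    by_cases ha : a.2 = 'T'
    · rw [List.dropWhile_cons_of_pos (by simp [ha])] at h
      exact ih _ _ _ h
    · rw [List.dropWhile_cons_of_neg (by simp [ha])] at h
      injection h with h1 h2
      subst h1
      simpa using ha

-- run lemma: consuming a block of 'T's from state Z / from state A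
theorem run_lemma : ∀ (run : List (Int × Char)), (∀ x ∈ run, x.2 = 'T') →
    ∀ (after : List (Int × Char)) (toks : List String) (errs : List Int),
    (dfaSig (run ++ after) "Z" toks errs =
      (if run.length % 2 = 0 then dfaSig after "Z" toks (errs ++ pvAlternate (run.drop 1))
       else dfaSig after "A" toks (errs ++ pvAlternate (run.drop 1)))) ∧
    (dfaSig (run ++ after) "A" toks errs =
      (if run.length % 2 = 0 then dfaSig after "A" toks (errs ++ pvAlternate run)
       else dfaSig after "Z" toks (errs ++ pvAlternate run))) := by
  intro run
  induction run with
  | nil => intro _ after toks errs; simp [pvAlternate]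
  | cons t run' ih =>
    intro hT after toks errs
    have htT : t.2 = 'T' := hT t (by simp)
    have hT' : ∀ x ∈ run', x.2 = 'T' := fun x hx => hT x (by simp [hx])
    obtain ⟨p, c⟩ := t
    simp only at htT; subst htT
    have ihA := fun (e : List Int) => (ih hT' after toks e).2
    have ihZ := fun (e : List Int) => (ih hT' after toks e).1
    rcases Nat.mod_two_eq_zero_or_one run'.length with hpar | hpar <;>
      [(have hp1 : (run'.length + 1) % 2 = 1 := by omega);
       (have hp1 : (run'.length + 1) % 2 = 0 := by omega)] <;>
    · constructor
      · simp [dfaSig, List.cons_append, ihA errs, hpar, hp1, pvAlternate]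
      · simp [dfaSig, List.cons_append, ihZ (errs ++ [p]), hpar, hp1, pvAlternate,
          List.append_assoc]

-- steady lemma: B's run-length loop equals A's DFA from state Z
theorem steady_lemma : ∀ (n : Nat) (sig : List (Int × Char)), sig.length ≤ n →
    ∀ (toks : List String) (errs : List Int),
    dfaSig sig "Z" toks errs = pvSteady sig toks errs := by
  intro n
  induction n with
  | zero =>
    intro sig hlen toks errs
    have : sig = [] := List.length_eq_zero_iff.1 (Nat.le_zero.1 hlen)
    subst this; simp [dfaSig, pvSteady]
  | succ n ih =>
    intro sig hlen toks errs
    match sig with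
    | [] => simp [dfaSig, pvSteady]
    | (p, c) :: rest =>
      by_cases hc : c = 'T'
      · subst hc
        have hsplit : rest.takeWhile (fun y => y.2 == 'T') ++
            rest.dropWhile (fun y => y.2 == 'T') = rest := List.takeWhile_append_dropWhile
        have hrunT : ∀ x ∈ rest.takeWhile (fun y => y.2 == 'T'), x.2 = 'T' :=
          fun x hx => takeWhile_T rest x hx
        have hlen' : (rest.takeWhile (fun y => y.2 == 'T')).length +
            (rest.dropWhile (fun y => y.2 == 'T')).length = rest.length := by
          rw [← List.length_append, hsplit]
        have step : dfaSig ((p, 'T') :: rest) "Z" toks errs =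
            dfaSig (rest.takeWhile (fun y => y.2 == 'T') ++
              rest.dropWhile (fun y => y.2 == 'T')) "A" toks errs := by
          rw [hsplit]; simp [dfaSig]
        rw [step, (run_lemma _ hrunT _ toks errs).2]
        rw [pvSteady]
        simp only [if_true]
        rcases Nat.mod_two_eq_zero_or_one (rest.takeWhile (fun y => y.2 == 'T')).length
          with hpar | hpar
        · -- even-length tail-run: the full run has odd length, B's "expect H" branch
          have hp1 : ((rest.takeWhile (fun y => y.2 == 'T')).length + 1) % 2 = 1 := by omega
          rw [if_pos hpar, if_pos hp1]
          split
          next heq => rw [heq]; simp [dfaSig]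
          next q d rest2 heq =>
            rw [heq]
            have hd : d ≠ 'T' := dropWhile_head_not_T rest q d rest2 heq
            have hlen2 : rest2.length ≤ n := by
              rw [heq] at hlen'; simp at hlen hlen'; omega
            by_cases hdh : d = 'H'
            · subst hdh
              simp only [dfaSig, reduceIte, if_pos rfl]
              exact ih rest2 hlen2 _ _
            · simp only [dfaSig, if_neg hdh, reduceIte]
              exact ih rest2 hlen2 _ _
        · have hp1 : ¬ ((rest.takeWhile (fun y => y.2 == 'T')).length + 1) % 2 = 1 := by omega
          rw [if_neg (by omega : ¬ (rest.takeWhile (fun y => y.2 == 'T')).length % 2 = 0),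
            if_neg hp1]
          have hlen2 : (rest.dropWhile (fun y => y.2 == 'T')).length ≤ n := by
            simp at hlen; omega
          exact ih _ hlen2 toks (errs ++ pvAlternate (rest.takeWhile (fun y => y.2 == 'T')))
      · -- c ≠ 'T': both sides record an error and continue
        have hlen2 : rest.length ≤ n := by simp at hlen; omega
        rw [pvSteady]
        simp only [if_neg hc]
        have hstep : dfaSig ((p, c) :: rest) "Z" toks errs
            = dfaSig rest "Z" toks (errs ++ [p]) := by
          simp [dfaSig, hc]
        rw [hstep]
        exact ih rest hlen2 _ _

-- ===== VERDICT (by name: the statement is the Claim_ definition above) =====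
theorem dfaWITH_spec : Claim_equal_dfaWITH := by
  intro s _
  unfold Spec_dfaWITH dfaWITH dfaWITH_alt
  rw [(loop_eq_sig s.toList 0 [] []).1]
  rcases hsig : pvSig s.toList 0 with _ | ⟨⟨p, c⟩, rest⟩
  · simp [dfaSig]
  · by_cases hw : c = 'W'
    · subst hw
      simp only [dfaSig, reduceIte, ne_eq, not_true_eq_false, if_neg, if_pos rfl]
      rcases rest with _ | ⟨⟨q, d⟩, rest2⟩
      · simp [dfaSig]
      · by_cases hi : d = 'I'
        · subst hi
          simp only [dfaSig, reduceIte, ne_eq, not_true_eq_false, if_neg, if_pos rfl]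
          exact steady_lemma rest2.length rest2 le_rfl [] []
        · simp only [dfaSig, if_neg hi, reduceIte, ne_eq, hi, not_false_eq_true, if_pos]
          exact steady_lemma rest2.length rest2 le_rfl [] [q]
    · simp only [dfaSig, if_neg hw, reduceIte, ne_eq, hw, not_false_eq_true, if_pos]
      exact steady_lemma rest.length rest le_rfl [] [p]
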